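-- pv_equiv track=rewrite | github.com/julianacastilloaraujo/AlgoritmoTransposicion | AlgoritmoT.py | asignar_numeros_clave
-- ===== SOURCE A (Python) =====
-- def asignar_numeros_clave(clave):
--     alfabeto = "ABCDEFGHIJKLMNOPQRSTUVWXYZ"
--     lista_num_clave = list(range(len(clave)))
--
--     init = 0
--     for i in range(len(alfabeto)):
--         for j in range(len(clave)):
--             if alfabeto[i] == clave[j]:
--                 init += 1
--                 lista_num_clave[j] = init
--     return lista_num_clave
-- ===== SOURCE B (Python) =====
-- def asignar_numeros_clave(clave):
--     alfabeto = "ABCDEFGHIJKLMNOPQRSTUVWXYZ"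
--     letras = set(alfabeto)
--     counts = {}
--     for ch in clave:
--         if ch in letras:
--             counts[ch] = counts.get(ch, 0) + 1
--     base = {}
--     acc = 0
--     for letra in alfabeto:
--         base[letra] = acc
--         acc += counts.get(letra, 0)
--     seen = {}
--     out = []
--     for j, ch in enumerate(clave):
--         if ch in letras:
--             seen[ch] = seen.get(ch, 0) + 1
--             out.append(base[ch] + seen[ch])
--         else:
--             out.append(j)
--     return out
-- ===== Notes on version B (the rewrite author's own statement) =====
-- stated objective: faster
-- what changed: Replaces A's 26 alphabet-letter scans over the key (26*n inner iterations with in-place list updates) by one Counter pass over the key, a 26-entry prefix-sum base-rank table, and a single enumerate pass emitting base+running-occurrence ranks.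
import Mathlib
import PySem

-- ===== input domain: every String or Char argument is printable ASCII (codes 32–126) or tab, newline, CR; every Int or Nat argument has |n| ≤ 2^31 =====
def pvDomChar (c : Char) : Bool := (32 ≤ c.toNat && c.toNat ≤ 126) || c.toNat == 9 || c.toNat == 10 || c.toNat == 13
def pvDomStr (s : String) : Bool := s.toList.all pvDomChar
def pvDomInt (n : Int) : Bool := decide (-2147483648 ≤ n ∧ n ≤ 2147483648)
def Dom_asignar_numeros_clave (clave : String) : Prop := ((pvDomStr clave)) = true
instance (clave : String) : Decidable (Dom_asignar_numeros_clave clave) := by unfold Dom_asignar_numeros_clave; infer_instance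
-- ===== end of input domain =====

-- B replaces A's 26 passes over the key (one per alphabet letter) by a letter Counter,
-- prefix-summed base ranks per letter, and a single pass assigning base + running occurrence;
-- objective: faster (single pass with O(1)-size dicts instead of 26 scans of the key).

-- ===== PORT A =====
def asignar_numeros_clave (clave : String) : List Int :=
  let alfabeto := "ABCDEFGHIJKLMNOPQRSTUVWXYZ".toList
  let cs := clave.toList
  let lista_num_clave : List Int := (List.range cs.length).map (fun j => Int.ofNat j)
  let r :=
    (List.range alfabeto.length).foldl
      (fun (st : Int × List Int) i =>
        (List.range cs.length).foldl
          (fun (st : Int × List Int) j =>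
            if alfabeto.getD i ' ' = cs.getD j ' ' then
              (st.1 + 1, st.2.set j (st.1 + 1))
            else st)
          st)
      (0, lista_num_clave)
  r.2

-- ===== PORT B =====
def asignar_numeros_clave_alt (clave : String) : List Int :=
  let alfabeto := "ABCDEFGHIJKLMNOPQRSTUVWXYZ".toList
  let letras : PySem.Set Char := PySem.Set.ofList alfabeto
  let cs := clave.toList
  let counts : PySem.Dict Char Int :=
    cs.foldl (fun d ch =>
      if PySem.Set.contains letras ch then d.insert ch (d.getD ch 0 + 1) else d)
      PySem.Dict.empty
  let bf :=
    alfabeto.foldl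
      (fun (st : PySem.Dict Char Int × Int) letra =>
        (st.1.insert letra st.2, st.2 + counts.getD letra 0))
      (PySem.Dict.empty, 0)
  let base := bf.1
  let fin :=
    (PySem.List.enumerate cs 0).foldl
      (fun (st : PySem.Dict Char Int × List Int) (p : Int × Char) =>
        if PySem.Set.contains letras p.2 then
          let s := st.1.getD p.2 0 + 1
          (st.1.insert p.2 s, st.2 ++ [base.getD p.2 0 + s])
        else (st.1, st.2 ++ [p.1]))
      (PySem.Dict.empty, [])
  fin.2

-- ===== PRECONDITION & SPEC =====
def Spec_asignar_numeros_clave (clave : String) (out : List Int) : Prop := out = asignar_numeros_clave_alt clave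
instance (clave : String) (out : List Int) : Decidable (Spec_asignar_numeros_clave clave out) := by unfold Spec_asignar_numeros_clave; infer_instance

-- ===== CLAIM (what is proved, stated in full; the proofs are below) =====
def Claim_equal_asignar_numeros_clave : Prop := ∀ (clave : String), Dom_asignar_numeros_clave clave → Spec_asignar_numeros_clave clave (asignar_numeros_clave clave)

-- ===== LEMMAS AND PROOFS =====

/-- The uppercase alphabet as a list of characters. -/
def alfL : List Char := "ABCDEFGHIJKLMNOPQRSTUVWXYZ".toList

/-- Common characterisation of both programs' output at position `j`:
letters get `#{chars of earlier alphabet letters} + #{occurrences of the letter up to j}`,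
other characters keep their index. -/
def midf (cs : List Char) (j : Nat) : Int :=
  let c := cs.getD j ' '
  if c ∈ alfL then
    ((cs.countP (fun x => decide (x ∈ alfL.takeWhile (fun y => y ≠ c)))) : Int)
      + (((cs.take (j + 1)).count c : Nat) : Int)
  else (j : Int)

/-- Folding over `range l.length` while reading `l.getD` is folding over `l`. -/
lemma foldl_range_getD {α β : Type} (l : List α) (d : α) (g : β → α → β) (st : β) :
    (List.range l.length).foldl (fun s i => g s (l.getD i d)) st = l.foldl g st := by
  induction l using List.reverseRecOn generalizing st with
  | nil => simp
  | append_singleton l a ih =>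
    simp only [List.length_append, List.length_singleton, List.range_succ, List.foldl_append,
      List.foldl_cons, List.foldl_nil]
    have h1 : (List.range l.length).foldl (fun s i => g s ((l ++ [a]).getD i d)) st
        = (List.range l.length).foldl (fun s i => g s (l.getD i d)) st := by
      apply PySem.List.foldl_congr_mem
      intro acc x hx
      rw [List.getD_append _ _ _ _ (List.mem_range.mp hx)]
    rw [h1, ih]
    congr 1
    simp [List.getD_eq_getElem?_getD]

lemma set_map_range (n j : Nat) (f : Nat → Int) (v : Int) (hj : j < n) :
    ((List.range n).map f).set j v = (List.range n).map (fun k => if k = j then v else f k) := by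
  apply List.ext_getElem
  · simp
  · intro i h1 h2
    simp only [List.getElem_set, List.getElem_map, List.getElem_range]
    split_ifs with h3 h4 h4
    · rfl
    · exact absurd h3.symm h4
    · exact absurd h4.symm h3
    · rfl

lemma indicator_sum (y : Char) (l : List Char) (hl : l.Nodup) :
    (l.map (fun x => if y = x then (1:Int) else 0)).sum = if y ∈ l then (1:Int) else 0 := by
  induction l with
  | nil => simp
  | cons a t ih =>
    simp only [List.nodup_cons] at hl
    simp only [List.map_cons, List.sum_cons, ih hl.2, List.mem_cons]
    by_cases h : y = a
    · subst h; simp [hl.1]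
    · simp [h]

/-- countP of membership in a nodup list is the sum of counts. -/
lemma countP_mem_eq_sum (cs : List Char) (l : List Char) (hl : l.Nodup) :
    ((cs.countP (fun x => decide (x ∈ l)) : Nat) : Int)
      = (l.map (fun x => ((cs.count x : Nat) : Int))).sum := by
  induction cs with
  | nil => simp
  | cons y t ih =>
    simp only [List.countP_cons, List.count_cons]
    push_cast
    rw [ih]
    have h2 : (l.map (fun x => ((t.count x : Int) + if y = x then 1 else 0))).sum
        = (l.map (fun x => (t.count x : Int))).sum + (l.map (fun x => if y = x then (1:Int) else 0)).sum := by
      rw [← List.sum_map_add]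
    simp only [beq_iff_eq]
    rw [h2, indicator_sum y l hl]
    by_cases h : y ∈ l <;> simp [h]

lemma countP_append_singleton (cs l : List Char) (c : Char) (hc : c ∉ l) (hl : l.Nodup) :
    (cs.countP (fun x => decide (x ∈ l ++ [c])) : Int)
      = (cs.countP (fun x => decide (x ∈ l)) : Int) + (cs.count c : Int) := by
  have hnl : (l ++ [c]).Nodup := by
    rw [List.nodup_append]
    refine ⟨hl, List.nodup_singleton c, ?_⟩
    intro x hx y hy
    simp only [List.mem_singleton] at hy
    exact fun h => hc ((hy ▸ h) ▸ hx)
  rw [countP_mem_eq_sum cs _ hnl, countP_mem_eq_sum cs l hl]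
  simp

/-- In a nodup list, the prefix strictly before the `m`-th element is `take m`. -/
lemma takeWhile_ne_getElem (l : List Char) (hl : l.Nodup) (m : Nat) (hm : m < l.length) :
    l.takeWhile (fun y => y ≠ l[m]) = l.take m := by
  induction l generalizing m with
  | nil => simp at hm
  | cons a t ih =>
    simp only [List.nodup_cons] at hl
    cases m with
    | zero => simp [List.takeWhile]
    | succ k =>
      simp only [List.length_cons, Nat.add_lt_add_iff_right] at hm
      have hk : k < t.length := hm
      have hmem : t[k] ∈ t := List.getElem_mem hk
      have hne : a ≠ t[k] := fun h => hl.1 (h ▸ hmem)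
      simp only [List.getElem_cons_succ, List.take_succ_cons]
      rw [List.takeWhile_cons]
      simp only [decide_not] at *
      simp [hne, ih hl.2 k hk]

/-- A's inner loop over the key for one fixed letter `c`. -/
lemma innerA (cs : List Char) (c : Char) (b : Int) (f : Nat → Int) (m : Nat) (hm : m ≤ cs.length) :
    (List.range m).foldl
      (fun (st : Int × List Int) j =>
        if c = cs.getD j ' ' then (st.1 + 1, st.2.set j (st.1 + 1)) else st)
      (b, (List.range cs.length).map f)
    = (b + ((cs.take m).count c : Int),
       (List.range cs.length).map
         (fun k => if k < m ∧ cs.getD k ' ' = c then b + ((cs.take (k + 1)).count c : Int) else f k)) := by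
  induction m with
  | zero =>
    simp only [List.range_zero, List.foldl_nil, List.take_zero, List.count_nil]
    refine Prod.ext (by simp) ?_
    simp only []
    apply List.map_congr_left
    intro k _
    simp
  | succ t ih =>
    have ht : t ≤ cs.length := Nat.le_of_succ_le hm
    have htl : t < cs.length := hm
    rw [List.range_succ, List.foldl_append, List.foldl_cons, List.foldl_nil, ih ht]
    have htake : cs.take (t + 1) = cs.take t ++ [cs[t]] := by
      rw [List.take_succ]
      simp [List.getElem?_eq_getElem htl]
    have hgetD : cs.getD t ' ' = cs[t] := by
      simp [List.getD_eq_getElem?_getD, List.getElem?_eq_getElem htl]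
    by_cases hc : c = cs.getD t ' '
    · simp only [if_pos hc]
      have hcount : ((cs.take (t+1)).count c : Int) = ((cs.take t).count c : Int) + 1 := by
        rw [htake]
        simp [List.count_append, hgetD ▸ hc.symm]
      refine Prod.ext ?_ ?_
      · simp only []
        omega
      · simp only []
        rw [set_map_range _ _ _ _ htl]
        apply List.map_congr_left
        intro k hk
        simp only [List.mem_range] at hk
        by_cases hkt : k = t
        · subst hkt
          have h1 : cs.getD k ' ' = c := hc.symm
          split_ifs with h2 h3 <;> simp_all <;> omega
        · have h2 : (k < t + 1 ∧ cs.getD k ' ' = c) ↔ (k < t ∧ cs.getD k ' ' = c) := by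
            constructor
            · rintro ⟨h1, h3⟩; exact ⟨by omega, h3⟩
            · rintro ⟨h1, h3⟩; exact ⟨by omega, h3⟩
          simp only [if_neg hkt, h2]
    · simp only [if_neg hc]
      have hcount : ((cs.take (t+1)).count c : Int) = ((cs.take t).count c : Int) := by
        rw [htake]
        have : cs[t] ≠ c := fun h => hc (by rw [hgetD, h])
        rw [List.count_append]
        simp [this]
      refine Prod.ext (by simp only []; rw [hcount]) ?_
      simp only []
      apply List.map_congr_left
      intro k hk
      simp only [List.mem_range] at hk
      by_cases hkt : k = t
      · subst hkt
        have hne : ¬ (cs.getD k ' ' = c) := fun h => hc h.symm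
        have hne' : ¬ (cs[k]?.getD ' ' = c) := by
          simpa [List.getD_eq_getElem?_getD] using hne
        simp [hne']
      · have : (k < t + 1 ∧ cs.getD k ' ' = c) ↔ (k < t ∧ cs.getD k ' ' = c) := by
          constructor
          · rintro ⟨h1, h2⟩; exact ⟨by omega, h2⟩
          · rintro ⟨h1, h2⟩; exact ⟨by omega, h2⟩
        simp only [this]

lemma getElem_not_mem_take {α : Type} (l : List α) (hl : l.Nodup) (t : Nat) (h : t < l.length) :
    l[t] ∉ l.take t := by
  intro hmem
  obtain ⟨i, hi, hieq⟩ := List.getElem_of_mem hmem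
  rw [List.getElem_take] at hieq
  have hil : i < l.length := by
    have := List.length_take_le t l
    omega
  have hlt : i < t := by
    have := List.length_take (i := t) (l := l)
    omega
  have : i = t := (List.Nodup.getElem_inj_iff hl).mp hieq
  omega

/-- A's outer loop over an alphabet prefix. -/
lemma outerA (cs : List Char) (m : Nat) (hm : m ≤ alfL.length) :
    (alfL.take m).foldl
      (fun (st : Int × List Int) c =>
        (List.range cs.length).foldl
          (fun (st : Int × List Int) j =>
            if c = cs.getD j ' ' then (st.1 + 1, st.2.set j (st.1 + 1)) else st)
          st)
      (0, (List.range cs.length).map (fun j => Int.ofNat j))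
    = ((cs.countP (fun x => decide (x ∈ alfL.take m)) : Int),
       (List.range cs.length).map
         (fun j => if cs.getD j ' ' ∈ alfL.take m then midf cs j else (j : Int))) := by
  induction m with
  | zero =>
    simp only [List.take_zero, List.foldl_nil]
    refine Prod.ext (by simp) ?_
    simp only []
    apply List.map_congr_left
    intro k _
    simp
  | succ t ih =>
    have htl : t < alfL.length := hm
    have ht : t ≤ alfL.length := Nat.le_of_succ_le hm
    have hnodup : alfL.Nodup := by decide
    set c := alfL[t] with hc
    have hmemc : c ∈ alfL := List.getElem_mem htl
    have hnot : c ∉ alfL.take t := getElem_not_mem_take alfL hnodup t htl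
    have htake : alfL.take (t + 1) = alfL.take t ++ [c] := by
      rw [List.take_succ, List.getElem?_eq_getElem htl]
      rfl
    rw [htake, List.foldl_append, List.foldl_cons, List.foldl_nil, ih ht]
    rw [innerA cs c _ _ cs.length (le_refl _)]
    have hpref : alfL.takeWhile (fun y => y ≠ c) = alfL.take t :=
      takeWhile_ne_getElem alfL hnodup t htl
    refine Prod.ext ?_ ?_
    · simp only []
      rw [List.take_length, countP_append_singleton cs _ c hnot (hnodup.sublist (List.take_sublist t alfL))]
    · simp only []
      apply List.map_congr_left
      intro k hk
      simp only [List.mem_range] at hk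
      by_cases h1 : cs.getD k ' ' = c
      · have hcond : k < cs.length ∧ cs.getD k ' ' = c := ⟨hk, h1⟩
        rw [if_pos hcond, if_pos (by simp only [List.mem_append, List.mem_singleton]; exact Or.inr h1)]
        unfold midf
        simp only [h1, if_pos hmemc, hpref]
      · have h2 : ¬ (k < cs.length ∧ cs.getD k ' ' = c) := fun h => h1 h.2
        simp only [if_neg h2]
        by_cases h3 : cs.getD k ' ' ∈ alfL.take t
        · rw [if_pos h3, if_pos (List.mem_append_left _ h3)]
        · have h4 : cs.getD k ' ' ∉ alfL.take t ++ [c] := by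
            simp only [List.mem_append, List.mem_singleton]
            rintro (h | h)
            · exact h3 h
            · exact h1 h
          rw [if_neg h3, if_neg h4]

lemma A_eq_mid (clave : String) :
    asignar_numeros_clave clave = (List.range clave.toList.length).map (midf clave.toList) := by
  unfold asignar_numeros_clave
  simp only []
  rw [show ("ABCDEFGHIJKLMNOPQRSTUVWXYZ".toList : List Char) = alfL from rfl,
    foldl_range_getD alfL ' '
      (fun (st : Int × List Int) c =>
        (List.range clave.toList.length).foldl
          (fun (st : Int × List Int) j =>
            if c = clave.toList.getD j ' ' then (st.1 + 1, st.2.set j (st.1 + 1)) else st)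
          st)]
  have h := outerA clave.toList alfL.length (le_refl _)
  rw [List.take_length] at h
  rw [h]
  apply List.map_congr_left
  intro j hj
  by_cases hmem : clave.toList.getD j ' ' ∈ alfL
  · rw [if_pos hmem]
  · rw [if_neg hmem]
    unfold midf
    simp only [if_neg hmem]

/-- B's counter dict. -/
lemma counts_spec (cs : List Char) (c : Char) :
    (cs.foldl (fun d ch =>
        if PySem.Set.contains (PySem.Set.ofList alfL) ch then d.insert ch (d.getD ch 0 + 1) else d)
      PySem.Dict.empty).getD c 0
      = if c ∈ alfL then (cs.count c : Int) else 0 := by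
  rw [PySem.List.foldl_if_eq_foldl_filter, PySem.Dict.getD_foldl_insert_add_one]
  have hp : ∀ ch, PySem.Set.contains (PySem.Set.ofList alfL) ch = decide (ch ∈ alfL) := by
    intro ch
    rw [show PySem.Set.ofList alfL = alfL from by decide]
    simp [PySem.Set.contains]
  by_cases h : c ∈ alfL
  · rw [if_pos h]
    have : (cs.filter (fun ch => PySem.Set.contains (PySem.Set.ofList alfL) ch)).count c
        = cs.count c := by
      rw [List.filter_congr (fun x _ => hp x)]
      exact List.count_filter (by simpa using h)
    simp [this]
  · rw [if_neg h]
    have : (cs.filter (fun ch => PySem.Set.contains (PySem.Set.ofList alfL) ch)).count c = 0 := by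
      rw [List.filter_congr (fun x _ => hp x)]
      rw [List.count_eq_zero]
      intro hmem
      exact h (by simpa using (List.mem_filter.mp hmem).2)
    simp [this]

/-- B's base dict built by prefix sums over a nodup list. -/
lemma baseFold (counts : PySem.Dict Char Int) (l : List Char) (hl : l.Nodup)
    (d0 : PySem.Dict Char Int) (a0 : Int) (c : Char) :
    ((l.foldl (fun (st : PySem.Dict Char Int × Int) x =>
        (st.1.insert x st.2, st.2 + counts.getD x 0)) (d0, a0)).1).getD c 0
      = if c ∈ l then a0 + ((l.takeWhile (fun y => y ≠ c)).map (fun x => counts.getD x 0)).sum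
        else d0.getD c 0 := by
  induction l generalizing d0 a0 with
  | nil => simp
  | cons a t ih =>
    simp only [List.nodup_cons] at hl
    simp only [List.foldl_cons]
    rw [ih hl.2]
    by_cases hca : c = a
    · subst hca
      rw [if_neg hl.1, PySem.Dict.getD_insert]
      simp only [List.mem_cons, true_or]
      rw [List.takeWhile_cons]
      simp
    · by_cases hct : c ∈ t
      · rw [if_pos hct, if_pos (List.mem_cons_of_mem a hct)]
        rw [List.takeWhile_cons]
        have : ¬ a = c := fun h => hca h.symm
        simp only [this, ne_eq, decide_not, decide_false, Bool.not_false, if_true]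
        simp only [List.map_cons, List.sum_cons]
        ring
      · have hcl : c ∉ a :: t := by
          simp only [List.mem_cons]
          rintro (h | h)
          · exact hca h
          · exact hct h
        rw [if_neg hct, if_neg hcl, PySem.Dict.getD_insert, if_neg hca]

lemma contains_ofList_alfL (ch : Char) :
    PySem.Set.contains (PySem.Set.ofList alfL) ch = decide (ch ∈ alfL) := by
  rw [show PySem.Set.ofList alfL = alfL from by decide]
  simp [PySem.Set.contains]

/-- B's final pass: the seen-counter and the output list after `m` characters. -/
lemma finPass (cs : List Char) (base : PySem.Dict Char Int) (m : Nat) (hm : m ≤ cs.length) :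
    (∀ c ∈ alfL,
      ((PySem.List.enumerate (cs.take m) 0).foldl
        (fun (st : PySem.Dict Char Int × List Int) (p : Int × Char) =>
          if PySem.Set.contains (PySem.Set.ofList alfL) p.2 then
            let s := st.1.getD p.2 0 + 1
            (st.1.insert p.2 s, st.2 ++ [base.getD p.2 0 + s])
          else (st.1, st.2 ++ [p.1]))
        (PySem.Dict.empty, [])).1.getD c 0 = (((cs.take m).count c : Nat) : Int)) ∧
    ((PySem.List.enumerate (cs.take m) 0).foldl
        (fun (st : PySem.Dict Char Int × List Int) (p : Int × Char) =>
          if PySem.Set.contains (PySem.Set.ofList alfL) p.2 then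
            let s := st.1.getD p.2 0 + 1
            (st.1.insert p.2 s, st.2 ++ [base.getD p.2 0 + s])
          else (st.1, st.2 ++ [p.1]))
        (PySem.Dict.empty, [])).2
      = (List.range m).map (fun j =>
          if cs.getD j ' ' ∈ alfL then
            base.getD (cs.getD j ' ') 0 + (((cs.take (j + 1)).count (cs.getD j ' ') : Nat) : Int)
          else (j : Int)) := by
  induction m with
  | zero => simp
  | succ t ih =>
    have htl : t < cs.length := hm
    have ht : t ≤ cs.length := Nat.le_of_succ_le hm
    obtain ⟨ihseen, ihout⟩ := ih ht
    have htake : cs.take (t + 1) = cs.take t ++ [cs[t]] := by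
      rw [List.take_succ]
      simp [List.getElem?_eq_getElem htl]
    have hlen : ((cs.take t).length : Int) = (t : Int) := by
      simp [List.length_take, Nat.min_eq_left ht]
    have henum : PySem.List.enumerate (cs.take (t + 1)) 0
        = PySem.List.enumerate (cs.take t) 0 ++ [((t : Int), cs[t])] := by
      rw [htake, PySem.List.enumerate_append]
      rw [PySem.List.enumerate_cons, PySem.List.enumerate_nil]
      simp [ht]
    rw [henum, List.foldl_append, List.foldl_cons, List.foldl_nil]
    have hgetD : cs.getD t ' ' = cs[t] := by
      simp [List.getD_eq_getElem?_getD, List.getElem?_eq_getElem htl]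
    have hsucc : (cs.take (t + 1)).count cs[t] = (cs.take t).count cs[t] + 1 := by
      rw [htake, List.count_append, List.count_singleton]
      simp
    have hsame : ∀ c : Char, cs[t] ≠ c → (cs.take (t + 1)).count c = (cs.take t).count c := by
      intro c hne
      rw [htake, List.count_append, List.count_singleton]
      simp [hne]
    by_cases hmem : cs[t] ∈ alfL
    · rw [if_pos (by rw [contains_ofList_alfL]; simpa using hmem)]
      constructor
      · intro c hc
        simp only []
        rw [PySem.Dict.getD_insert]
        by_cases hcc : c = cs[t]
        · rw [if_pos hcc, hcc, ihseen cs[t] hmem, hsucc]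
          push_cast
          ring
        · have hne : cs[t] ≠ c := fun h => hcc h.symm
          rw [if_neg hcc, ihseen c hc, hsame c hne]
      · simp only []
        rw [ihout, List.range_succ, List.map_append]
        congr 1
        simp only [List.map_cons, List.map_nil]
        have hcond : cs.getD t ' ' ∈ alfL := by rw [hgetD]; exact hmem
        rw [if_pos hcond, hgetD, ihseen cs[t] hmem, hsucc]
        push_cast
        ring_nf
    · rw [if_neg (by rw [contains_ofList_alfL]; simpa using hmem)]
      constructor
      · intro c hc
        simp only []
        rw [ihseen c hc, hsame c (fun h => hmem (h ▸ hc))]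
      · simp only []
        rw [ihout, List.range_succ, List.map_append]
        congr 1
        simp only [List.map_cons, List.map_nil]
        have hcond : ¬ (cs.getD t ' ' ∈ alfL) := by rw [hgetD]; exact hmem
        rw [if_neg hcond]

lemma base_spec (cs : List Char) (c : Char) (hc : c ∈ alfL) :
    ((alfL.foldl
      (fun (st : PySem.Dict Char Int × Int) letra =>
        (st.1.insert letra st.2,
          st.2 + (cs.foldl
            (fun d ch =>
              if PySem.Set.contains (PySem.Set.ofList alfL) ch then d.insert ch (d.getD ch 0 + 1)
              else d) PySem.Dict.empty).getD letra 0))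
      (PySem.Dict.empty, 0)).1).getD c 0
    = ((cs.countP (fun x => decide (x ∈ alfL.takeWhile (fun y => y ≠ c))) : Nat) : Int) := by
  have halfnd : alfL.Nodup := by decide
  rw [baseFold _ alfL halfnd _ _ _, if_pos hc]
  have hsub : ∀ x ∈ alfL.takeWhile (fun y => y ≠ c), x ∈ alfL :=
    fun x hx => (List.takeWhile_sublist _).subset hx
  rw [List.map_congr_left (fun x hx => by
    rw [counts_spec cs x, if_pos (hsub x hx)])]
  rw [countP_mem_eq_sum cs _ (halfnd.sublist (List.takeWhile_sublist _))]
  ring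

set_option maxHeartbeats 1000000 in
lemma B_eq_mid (clave : String) :
    asignar_numeros_clave_alt clave = (List.range clave.toList.length).map (midf clave.toList) := by
  unfold asignar_numeros_clave_alt
  simp only []
  rw [show ("ABCDEFGHIJKLMNOPQRSTUVWXYZ".toList : List Char) = alfL from rfl]
  have hfin := (finPass clave.toList
    ((alfL.foldl
      (fun (st : PySem.Dict Char Int × Int) letra =>
        (st.1.insert letra st.2,
          st.2 + (clave.toList.foldl
            (fun d ch =>
              if PySem.Set.contains (PySem.Set.ofList alfL) ch then d.insert ch (d.getD ch 0 + 1)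
              else d) PySem.Dict.empty).getD letra 0))
      (PySem.Dict.empty, 0)).1)
    clave.toList.length (le_refl _)).2
  rw [List.take_length] at hfin
  rw [hfin]
  apply List.map_congr_left
  intro j hj
  simp only [List.mem_range] at hj
  by_cases hmem : clave.toList.getD j ' ' ∈ alfL
  · rw [if_pos hmem, base_spec clave.toList _ hmem]
    unfold midf
    simp only [if_pos hmem]
  · rw [if_neg hmem]
    unfold midf
    simp only [if_neg hmem]

-- ===== VERDICT (by name: the statement is the Claim_ definition above) =====
theorem asignar_numeros_clave_spec : Claim_equal_asignar_numeros_clave := by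
  intro clave _
  unfold Spec_asignar_numeros_clave
  rw [A_eq_mid, B_eq_mid]
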